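-- pv_equiv track=rewrite | github.com/phlippe/P2_Net | code/data.py | _determine_aligned_words
-- ===== SOURCE A (Python) =====
-- def _determine_aligned_words(masked_sent_1, masked_sent_2):
-- 	aligned_words = list()
-- 	for w_ind_1, w in enumerate(masked_sent_1):
-- 		if w is None:
-- 			continue
-- 		if w in masked_sent_2:
-- 			num_prev_occurrences = sum([w[0] == al_w[3] for al_w in aligned_words])
-- 			if num_prev_occurrences > 0: # Check if this word was already aligned
-- 				w_ind_2 = -1
-- 				for w_ind_2_local, w_2 in enumerate(masked_sent_2):
-- 					if w_2 == w:
-- 						if num_prev_occurrences == 0: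
-- 							w_ind_2 = w_ind_2_local
-- 							break
-- 						else:
-- 							num_prev_occurrences -= 1
-- 				if w_ind_2 == -1:
-- 					continue # Skip this word because there are no alignments anymore
-- 			else:
-- 				w_ind_2 = masked_sent_2.index(w)
-- 			aligned_words.append((w_ind_1, w_ind_2, w[1], w[0]))
-- 	return aligned_words
-- ===== SOURCE B (Python) =====
-- def _determine_aligned_words(masked_sent_1, masked_sent_2):
-- 	# Index sent_2 occurrence positions once, track per-first-word usage counters: one pass, O(n+m).
-- 	positions = {}
-- 	for j, w2 in enumerate(masked_sent_2):
-- 		if w2 is not None: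
-- 			positions.setdefault(w2, []).append(j)
-- 	used = {}
-- 	aligned = []
-- 	for i, w in enumerate(masked_sent_1):
-- 		if w is None:
-- 			continue
-- 		occ = positions.get(w, [])
-- 		k = used.get(w[0], 0)
-- 		if k < len(occ):
-- 			aligned.append((i, occ[k], w[1], w[0]))
-- 			used[w[0]] = k + 1
-- 	return aligned
-- ===== Notes on version B (the rewrite author's own statement) =====
-- stated objective: faster
-- what changed: Replaced A's per-word rescans of the aligned list and of sent_2 (nested loops) by a one-time position index of sent_2 plus per-first-word usage counters in dicts, a single pass over each sentence.
import Mathlib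
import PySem

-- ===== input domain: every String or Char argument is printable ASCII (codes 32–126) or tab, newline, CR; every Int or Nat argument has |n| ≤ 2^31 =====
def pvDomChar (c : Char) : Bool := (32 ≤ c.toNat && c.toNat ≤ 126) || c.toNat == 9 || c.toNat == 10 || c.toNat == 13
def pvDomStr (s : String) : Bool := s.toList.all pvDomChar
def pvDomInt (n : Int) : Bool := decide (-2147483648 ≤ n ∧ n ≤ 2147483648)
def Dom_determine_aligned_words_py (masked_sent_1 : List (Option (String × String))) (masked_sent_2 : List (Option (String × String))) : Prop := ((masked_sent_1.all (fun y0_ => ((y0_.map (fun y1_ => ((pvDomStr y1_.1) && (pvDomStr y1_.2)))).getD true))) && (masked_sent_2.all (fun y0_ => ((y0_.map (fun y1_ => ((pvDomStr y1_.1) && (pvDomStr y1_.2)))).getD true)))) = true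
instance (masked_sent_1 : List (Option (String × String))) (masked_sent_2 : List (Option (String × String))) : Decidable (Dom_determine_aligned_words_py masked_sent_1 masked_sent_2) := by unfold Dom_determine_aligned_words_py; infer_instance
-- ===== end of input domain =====

-- ===== PORT A =====
-- B builds a position index of sent_2 and per-word counters: one pass instead of A's nested rescans (objective: faster).
-- inner loop of A: scan sent_2 from index j, skipping npo matches of w, returning the next match's index or -1
def pyFindOcc (l : List (Option (String × String))) (j : Int) (w : String × String) (npo : Int) : Int :=
  match l with
  | [] => -1
  | x :: rest =>
      if x == some w then
        (if npo == 0 then j else pyFindOcc rest (j + 1) w (npo - 1))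
      else pyFindOcc rest (j + 1) w npo

-- body of A's outer loop (one iteration, current aligned_words as accumulator)
def stepA (masked_sent_2 : List (Option (String × String)))
    (aligned : List (Int × Int × String × String)) :
    Int × Option (String × String) → List (Int × Int × String × String)
  | (_, none) => aligned
  | (w_ind_1, some w) =>
      if masked_sent_2.contains (some w) then
        let num : Int := (aligned.map (fun al => if w.1 == al.2.2.2 then (1 : Int) else 0)).sum
        if num > 0 then
          let j := pyFindOcc masked_sent_2 0 w num
          if j == -1 then aligned
          else aligned ++ [(w_ind_1, j, w.2, w.1)]
        else
          match PySem.List.index? masked_sent_2 (some w) with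
          | some j => aligned ++ [(w_ind_1, (j : Int), w.2, w.1)]
          | none => aligned   -- unreachable: guarded by the contains check (Python .index would raise)
      else aligned

def determine_aligned_words_py (masked_sent_1 : List (Option (String × String))) (masked_sent_2 : List (Option (String × String))) : List (Int × Int × String × String) :=
  (PySem.List.enumerate masked_sent_1).foldl (stepA masked_sent_2) []

-- ===== PORT B =====
-- positions.setdefault(w2, []).append(j)  ==  positions[w2] = positions.get(w2, []) + [j]
def buildPositions (masked_sent_2 : List (Option (String × String))) : PySem.Dict (String × String) (List Int) :=
  (PySem.List.enumerate masked_sent_2).foldl (fun d p =>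
    match p.2 with
    | none => d
    | some w2 => d.modify w2 [] (fun occ => occ ++ [p.1])) PySem.Dict.empty

-- body of B's loop: state = (used counters, aligned output)
def stepB (positions : PySem.Dict (String × String) (List Int))
    (st : PySem.Dict String Int × List (Int × Int × String × String)) :
    Int × Option (String × String) → PySem.Dict String Int × List (Int × Int × String × String)
  | (_, none) => st
  | (i, some w) =>
      let occ := positions.getD w []
      let k := st.1.getD w.1 0
      if k < (occ.length : Int) then
        (st.1.insert w.1 (k + 1), st.2 ++ [(i, PySem.List.pyGetD occ k 0, w.2, w.1)])
      else st

def determine_aligned_words_py_alt (masked_sent_1 : List (Option (String × String))) (masked_sent_2 : List (Option (String × String))) : List (Int × Int × String × String) :=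
  ((PySem.List.enumerate masked_sent_1).foldl (stepB (buildPositions masked_sent_2)) (PySem.Dict.empty, [])).2

-- ===== PRECONDITION & SPEC =====
def Spec_determine_aligned_words_py (masked_sent_1 : List (Option (String × String))) (masked_sent_2 : List (Option (String × String))) (out : List (Int × Int × String × String)) : Prop := out = determine_aligned_words_py_alt masked_sent_1 masked_sent_2
instance (masked_sent_1 : List (Option (String × String))) (masked_sent_2 : List (Option (String × String))) (out : List (Int × Int × String × String)) : Decidable (Spec_determine_aligned_words_py masked_sent_1 masked_sent_2 out) := by unfold Spec_determine_aligned_words_py; infer_instance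

-- ===== CLAIM (what is proved, stated in full; the proofs are below) =====
def Claim_equal_determine_aligned_words_py : Prop := ∀ (masked_sent_1 : List (Option (String × String))) (masked_sent_2 : List (Option (String × String))), Dom_determine_aligned_words_py masked_sent_1 masked_sent_2 → Spec_determine_aligned_words_py masked_sent_1 masked_sent_2 (determine_aligned_words_py masked_sent_1 masked_sent_2)

-- ===== LEMMAS AND PROOFS =====

-- indices (counted from j) of the occurrences of `some w` in l
def occFrom (l : List (Option (String × String))) (j : Int) (w : String × String) : List Int :=
  match l with
  | [] => []
  | x :: rest => if x == some w then j :: occFrom rest (j + 1) w else occFrom rest (j + 1) w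

lemma occFrom_nonneg (l : List (Option (String × String))) (j : Int) (w : String × String)
    (hj : 0 ≤ j) : ∀ x ∈ occFrom l j w, 0 ≤ x := by
  induction l generalizing j with
  | nil => simp [occFrom]
  | cons a t ih =>
      intro x hx
      unfold occFrom at hx
      split at hx
      · rcases List.mem_cons.mp hx with h | h
        · omega
        · exact ih (j + 1) (by omega) x h
      · exact ih (j + 1) (by omega) x hx

lemma pyFindOcc_eq (l : List (Option (String × String))) (w : String × String) :
    ∀ (j : Int) (n : Nat),
      pyFindOcc l j w (n : Int) = ((occFrom l j w)[n]?).getD (-1) := by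
  induction l with
  | nil => intro j n; simp [pyFindOcc, occFrom]
  | cons a t ih =>
      intro j n
      unfold pyFindOcc occFrom
      by_cases ha : a = some w
      · have hb : (a == some w) = true := by simp [ha]
        simp only [hb, if_true]
        cases n with
        | zero => simp
        | succ m =>
            have h1 : ((↑(m + 1) : Int) == 0) = false := by
              rw [beq_eq_false_iff_ne]
              push_cast
              omega
            simp only [h1, Bool.false_eq_true, if_false]
            have h2 : ((m + 1 : Nat) : Int) - 1 = ((m : Nat) : Int) := by push_cast; ring
            rw [h2, ih (j + 1) m]
            simp
      · have hb : (a == some w) = false := by simp [ha]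
        simp only [hb, Bool.false_eq_true, if_false]
        exact ih (j + 1) n

lemma index?_eq_head_occFrom (l : List (Option (String × String))) (w : String × String) :
    ∀ (j : Int), (occFrom l j w).head? = (PySem.List.index? l (some w)).map (fun k => j + (k : Int)) := by
  induction l with
  | nil => intro j; simp [occFrom, PySem.List.index?]
  | cons a t ih =>
      intro j
      unfold occFrom
      by_cases ha : a = some w
      · subst ha
        rw [PySem.List.index?_cons_self]
        simp
      · have hb : (a == some w) = false := by simp [ha]
        rw [PySem.List.index?_cons_of_ne t ha]
        simp only [hb, Bool.false_eq_true, if_false]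
        rw [ih (j + 1)]
        cases h : PySem.List.index? t (some w) with
        | none => simp
        | some k =>
            simp
            omega

lemma contains_iff_occFrom (l : List (Option (String × String))) (w : String × String) :
    ∀ (j : Int), l.contains (some w) = !(occFrom l j w).isEmpty := by
  induction l with
  | nil => intro j; simp [occFrom]
  | cons a t ih =>
      intro j
      by_cases ha : a = some w
      · subst ha; simp [occFrom]
      · have hb : (a == some w) = false := by simp [ha]
        have ha' : some w ≠ a := fun h => ha h.symm
        have hc : (a :: t).contains (some w) = t.contains (some w) := by
          simp [ha']
        rw [hc]
        unfold occFrom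
        simp only [hb, Bool.false_eq_true, if_false]
        exact ih (j + 1)

-- the positions dict built by B holds exactly the occurrence indices
lemma positions_getD (l : List (Option (String × String))) (w : String × String) :
    ∀ (j : Int) (d : PySem.Dict (String × String) (List Int)),
      ((PySem.List.enumerate l j).foldl (fun d p =>
          match p.2 with
          | none => d
          | some w2 => d.modify w2 [] (fun occ => occ ++ [p.1])) d).getD w []
        = d.getD w [] ++ occFrom l j w := by
  induction l with
  | nil => intro j d; simp [PySem.List.enumerate_nil, occFrom]
  | cons a t ih =>
      intro j d
      rw [PySem.List.enumerate_cons]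
      cases a with
      | none =>
          simp only [List.foldl_cons]
          rw [ih (j + 1) d]
          simp [occFrom]
      | some w2 =>
          simp only [List.foldl_cons]
          rw [ih (j + 1)]
          rw [PySem.Dict.getD_modify]
          unfold occFrom
          by_cases h : w = w2
          · subst h
            simp
            cases t <;> simp [occFrom]
          · have h2 : (some w2 == some w) = false := by
              simp [show w2 ≠ w from fun hh => h hh.symm]
            simp [h, h2]
            cases t <;> simp [occFrom]

-- count of previously aligned words with last component s, as A computes it
def cntA (aligned : List (Int × Int × String × String)) (s : String) : Int :=
  (aligned.map (fun al => if s == al.2.2.2 then (1 : Int) else 0)).sum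

lemma cntA_nonneg (aligned : List (Int × Int × String × String)) (s : String) : 0 ≤ cntA aligned s := by
  unfold cntA
  induction aligned with
  | nil => simp
  | cons a t ih =>
      simp only [List.map_cons, List.sum_cons]
      split <;> omega

lemma cntA_append (aligned : List (Int × Int × String × String)) (e : Int × Int × String × String) (s : String) :
    cntA (aligned ++ [e]) s = cntA aligned s + (if s == e.2.2.2 then 1 else 0) := by
  unfold cntA
  simp

-- the main loop invariant: B's counter dict tracks A's rescans of the aligned list
lemma main_loop (masked_sent_2 : List (Option (String × String)))
    (positions : PySem.Dict (String × String) (List Int))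
    (hpos : ∀ w, positions.getD w [] = occFrom masked_sent_2 0 w)
    (s1 : List (Option (String × String))) :
    ∀ (i : Int) (aligned : List (Int × Int × String × String)) (used : PySem.Dict String Int),
      (∀ s, used.getD s 0 = cntA aligned s) →
      (PySem.List.enumerate s1 i).foldl (stepA masked_sent_2) aligned
      = ((PySem.List.enumerate s1 i).foldl (stepB positions) (used, aligned)).2 := by
  induction s1 with
  | nil => intro i aligned used hinv; simp [PySem.List.enumerate_nil]
  | cons a t ih =>
      intro i aligned used hinv
      rw [PySem.List.enumerate_cons, List.foldl_cons, List.foldl_cons]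
      cases a with
      | none => simp only [stepA, stepB]; exact ih (i + 1) aligned used hinv
      | some w =>
          simp only [stepA, stepB]
          rw [hpos w, hinv w.1]
          have hsum : (aligned.map (fun al => if w.1 == al.2.2.2 then (1 : Int) else 0)).sum
              = cntA aligned w.1 := rfl
          rw [hsum]
          have hcont := contains_iff_occFrom masked_sent_2 w 0
          have hnum0 : 0 ≤ cntA aligned w.1 := cntA_nonneg aligned w.1
          by_cases hlt : (cntA aligned w.1).toNat < (occFrom masked_sent_2 0 w).length
          · -- in range: both sides append the (cntA)-th occurrence index
            have hempty : occFrom masked_sent_2 0 w ≠ [] := by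
              intro h; rw [h] at hlt; simp at hlt
            have hc : masked_sent_2.contains (some w) = true := by
              rw [hcont]; simp [hempty]
            have hklt : cntA aligned w.1 < ((occFrom masked_sent_2 0 w).length : Int) := by omega
            rw [if_pos hklt]
            simp only [hc, if_true]
            have hget : PySem.List.pyGetD (occFrom masked_sent_2 0 w) (cntA aligned w.1) 0
                = (occFrom masked_sent_2 0 w)[(cntA aligned w.1).toNat]'hlt :=
              PySem.List.pyGetD_eq_getElem (occFrom masked_sent_2 0 w) 0 hnum0 (by omega)
            have helem : 0 ≤ (occFrom masked_sent_2 0 w)[(cntA aligned w.1).toNat]'hlt :=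
              occFrom_nonneg masked_sent_2 0 w le_rfl _ (List.getElem_mem _)
            have hcast : cntA aligned w.1 = (((cntA aligned w.1).toNat : Nat) : Int) := by omega
            have hinv' : ∀ s, (used.insert w.1 (cntA aligned w.1 + 1)).getD s 0 =
                cntA (aligned ++ [(i, (occFrom masked_sent_2 0 w)[(cntA aligned w.1).toNat]'hlt, w.2, w.1)]) s := by
              intro s
              rw [PySem.Dict.getD_insert, cntA_append]
              by_cases hs : s = w.1
              · subst hs; simp
              · have hsb : (s == w.1) = false := by simp [hs]
                simp [hs, hsb, hinv s]
            by_cases hpos0 : cntA aligned w.1 > 0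
            · -- A takes the pyFindOcc branch
              have hfind : pyFindOcc masked_sent_2 0 w (cntA aligned w.1)
                  = (occFrom masked_sent_2 0 w)[(cntA aligned w.1).toNat]'hlt := by
                conv_lhs => rw [hcast]
                rw [pyFindOcc_eq]
                simp [List.getElem?_eq_getElem hlt]
              have hne : (pyFindOcc masked_sent_2 0 w (cntA aligned w.1) == -1) = false := by
                rw [hfind, beq_eq_false_iff_ne]
                omega
              rw [if_pos hpos0]
              simp only [hne, Bool.false_eq_true, if_false]
              rw [hfind, hget]
              exact ih (i + 1) _ _ hinv'
            · -- cntA = 0: A takes the .index branch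
              have hz : cntA aligned w.1 = 0 := by omega
              have hidx : PySem.List.index? masked_sent_2 (some w)
                  = some ((occFrom masked_sent_2 0 w)[(cntA aligned w.1).toNat]'hlt).toNat := by
                have hh := index?_eq_head_occFrom masked_sent_2 w 0
                cases hi : PySem.List.index? masked_sent_2 (some w) with
                | none =>
                    rw [hi] at hh
                    simp [List.head?_eq_none_iff] at hh
                    exact absurd hh hempty
                | some k =>
                    rw [hi] at hh
                    obtain ⟨x, rest, hx⟩ : ∃ x rest, occFrom masked_sent_2 0 w = x :: rest := by
                      cases hcc : occFrom masked_sent_2 0 w with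
                      | nil => exact absurd hcc hempty
                      | cons x rest => exact ⟨x, rest, rfl⟩
                    have h0 : (cntA aligned w.1).toNat = 0 := by omega
                    have hxk : x = (k : Int) := by
                      rw [hx] at hh
                      simpa using hh
                    have hval : ((occFrom masked_sent_2 0 w)[(cntA aligned w.1).toNat]'hlt) = (k : Int) := by
                      simp [hx, h0, hxk]
                    rw [hval]
                    simp
              have hngt : ¬ (cntA aligned w.1 > 0) := by omega
              rw [if_neg hngt, hidx]
              have htn : (((occFrom masked_sent_2 0 w)[(cntA aligned w.1).toNat]'hlt).toNat : Int)
                  = (occFrom masked_sent_2 0 w)[(cntA aligned w.1).toNat]'hlt :=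
                Int.toNat_of_nonneg helem
              simp only [htn, hget]
              exact ih (i + 1) _ _ hinv'
          · -- out of range: both sides skip
            have hklen : ¬ (cntA aligned w.1 < ((occFrom masked_sent_2 0 w).length : Int)) := by omega
            rw [if_neg hklen]
            by_cases hempty : occFrom masked_sent_2 0 w = []
            · have hc : masked_sent_2.contains (some w) = false := by
                rw [hcont, hempty]; simp
              simp only [hc, Bool.false_eq_true, if_false]
              exact ih (i + 1) aligned used hinv
            · have hc : masked_sent_2.contains (some w) = true := by
                rw [hcont]; simp [hempty]
              simp only [hc, if_true]
              have hlen : 0 < (occFrom masked_sent_2 0 w).length := List.length_pos_iff.mpr hempty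
              have hpos0 : cntA aligned w.1 > 0 := by omega
              have hcast : cntA aligned w.1 = (((cntA aligned w.1).toNat : Nat) : Int) := by omega
              have hfind : pyFindOcc masked_sent_2 0 w (cntA aligned w.1) = -1 := by
                conv_lhs => rw [hcast]
                rw [pyFindOcc_eq]
                rw [List.getElem?_eq_none (by omega)]
                rfl
              have hne : (pyFindOcc masked_sent_2 0 w (cntA aligned w.1) == -1) = true := by
                rw [hfind]; simp
              rw [if_pos hpos0]
              simp only [hne, if_true]
              exact ih (i + 1) aligned used hinv

-- ===== VERDICT (by name: the statement is the Claim_ definition above) =====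
theorem determine_aligned_words_py_spec : Claim_equal_determine_aligned_words_py := by
  intro s1 s2 _
  unfold Spec_determine_aligned_words_py determine_aligned_words_py determine_aligned_words_py_alt
  exact main_loop s2 (buildPositions s2)
    (fun w => by unfold buildPositions; simpa using positions_getD s2 w 0 PySem.Dict.empty)
    s1 0 [] PySem.Dict.empty (fun s => by simp [cntA])
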